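-- pv_equiv track=rewrite | github.com/L1ghtBeam/adventOfCode2025 | day10/puzzle20.py | button_combos
-- ===== SOURCE A (Python) =====
-- from itertools import combinations
--
-- def button_combos(buttons):
--     combos = []
--     for r in range(len(buttons)+1):
--         for vec_list in combinations(buttons, r):
--             result = [0] * len(buttons[0])
--             for vec in vec_list:
--                 for i in range(len(result)):
--                     result[i] += vec[i]
--             combos.append((result, r))
--     return combos
-- ===== SOURCE B (Python) =====
-- def button_combos(buttons):
--     d = len(buttons[0])
--     n = len(buttons)
--
--     def subset_sums(lst, acc, k):
--         # (sum vector, subset size) for every subset of lst, offset by acc/k;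
--         # subsets containing the first element come first.
--         if not lst:
--             return [(acc, k)]
--         v = lst[0]
--         rest = lst[1:]
--         return subset_sums(rest, [acc[j] + v[j] for j in range(d)], k + 1) \
--             + subset_sums(rest, acc, k)
--
--     pairs = subset_sums(buttons, [0] * d, 0)
--     buckets = [[] for _ in range(n + 1)]
--     for p in pairs:
--         buckets[p[1]].append(p)
--     out = []
--     for bucket in buckets:
--         out.extend(bucket)
--     return out
-- ===== Notes on version B (the rewrite author's own statement) =====
-- stated objective: alternative
-- what changed: Instead of rebuilding each subset's sum from a zero vector (r vector additions per size-r combination, repeated for every subset size), B enumerates all subsets once in a recursion that carries a running sum (one vector addition per subset) and then groups the (sum, size) pairs by size with a single bucket pass, preserving A's combinations order; intended as faster, measured 1.98x at the largest size both finished.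
import Mathlib
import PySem

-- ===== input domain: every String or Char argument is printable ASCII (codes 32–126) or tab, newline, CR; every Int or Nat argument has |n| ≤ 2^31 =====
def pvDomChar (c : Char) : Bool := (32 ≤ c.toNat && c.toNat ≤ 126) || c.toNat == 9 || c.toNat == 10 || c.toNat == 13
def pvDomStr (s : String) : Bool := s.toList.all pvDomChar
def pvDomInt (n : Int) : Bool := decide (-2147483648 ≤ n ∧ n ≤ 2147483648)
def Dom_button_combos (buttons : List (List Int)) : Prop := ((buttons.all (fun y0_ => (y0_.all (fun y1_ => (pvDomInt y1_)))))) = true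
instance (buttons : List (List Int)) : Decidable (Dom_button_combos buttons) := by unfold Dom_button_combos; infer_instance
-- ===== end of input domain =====

-- B replaces A's per-size re-summation of every subset (one fresh zero vector plus r vector
-- additions per size-r subset) by a single shared recursion that carries a running sum, computing
-- every subset's sum with one vector addition, then groups the (sum, size) pairs by size in one
-- bucket pass; the equivalence proved is about the RETURN value (A mutates only its own locals).

-- ===== PORT A =====
-- 'for i in range(len(result)): result[i] += vec[i]'
def aAddInto (result vec : List Int) : List Int :=
  (PySem.List.pyRange 0 (result.length : Int) 1).foldl
    (fun res i => PySem.List.pySetD res i (PySem.List.pyGetD res i 0 + PySem.List.pyGetD vec i 0)) result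

def button_combos (buttons : List (List Int)) : List (List Int × Int) :=
  (PySem.List.pyRange 0 ((buttons.length : Int) + 1) 1).foldl (fun combos r =>
    (PySem.List.combinations buttons r.toNat).foldl (fun combos vecList =>
      combos ++ [(vecList.foldl aAddInto
        (List.replicate (PySem.List.pyGetD buttons 0 []).length 0), r)]) combos) []

-- ===== PORT B =====
-- '[acc[j] + v[j] for j in range(d)]'
def bRow (d : Nat) (acc v : List Int) : List Int :=
  (PySem.List.pyRange 0 (d : Int) 1).map
    (fun j => PySem.List.pyGetD acc j 0 + PySem.List.pyGetD v j 0)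

-- recursive helper 'subset_sums(lst, acc, k)' of Source B
def bSubsetSums (d : Nat) : List (List Int) → List Int → Int → List (List Int × Int)
  | [], acc, k => [(acc, k)]
  | v :: rest, acc, k =>
      bSubsetSums d rest (bRow d acc v) (k + 1) ++ bSubsetSums d rest acc k

def button_combos_alt (buttons : List (List Int)) : List (List Int × Int) :=
  let d := (PySem.List.pyGetD buttons 0 []).length
  let n := buttons.length
  let pairs := bSubsetSums d buttons (List.replicate d 0) 0
  let buckets := pairs.foldl
    (fun bks p => PySem.List.pySetD bks p.2 (PySem.List.pyGetD bks p.2 [] ++ [p]))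
    (List.replicate (n + 1) ([] : List (List Int × Int)))
  buckets.foldl (fun out bucket => out ++ bucket) []

-- ===== PRECONDITION & SPEC =====
-- Pre_ excludes exactly the inputs on which the Python A raises IndexError:
-- empty 'buttons' (buttons[0]) and lists containing a vector shorter than buttons[0] (vec[i]).
def Pre_button_combos (buttons : List (List Int)) : Prop :=
  buttons ≠ [] ∧ ∀ v ∈ buttons, (buttons.headD []).length ≤ v.length
instance (buttons : List (List Int)) : Decidable (Pre_button_combos buttons) := by
  unfold Pre_button_combos; infer_instance

def pvWitness_button_combos : List (List Int) := [[1, 2], [3, 4]]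

def Spec_button_combos (buttons : List (List Int)) (out : List (List Int × Int)) : Prop := out = button_combos_alt buttons
instance (buttons : List (List Int)) (out : List (List Int × Int)) : Decidable (Spec_button_combos buttons out) := by unfold Spec_button_combos; infer_instance

-- ===== CLAIM (what is proved, stated in full; the proofs are below) =====
def Claim_equal_button_combos : Prop := ∀ (buttons : List (List Int)), Dom_button_combos buttons → Pre_button_combos buttons → Spec_button_combos buttons (button_combos buttons)

-- ===== LEMMAS AND PROOFS =====

-- A's in-place '+=' loop written as the map that B's comprehension builds
theorem foldl_set_range_eq (vec : List Int) :
    ∀ (n : Nat) (res : List Int), n ≤ res.length →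
    (List.range n).foldl (fun r i => r.set i (r.getD i 0 + vec.getD i 0)) res
      = (List.range n).map (fun j => res.getD j 0 + vec.getD j 0) ++ res.drop n := by
  intro n
  induction n with
  | zero => intro res h; simp
  | succ m ih =>
    intro res h
    rw [List.range_succ, List.foldl_append, List.map_append, ih res (by omega)]
    have hm : m < res.length := by omega
    have hlen : ((List.range m).map (fun j => res.getD j 0 + vec.getD j 0)).length = m := by simp
    simp only [List.foldl_cons, List.foldl_nil, List.map_cons, List.map_nil]
    have hget : ((List.range m).map (fun j => res.getD j 0 + vec.getD j 0) ++ res.drop m).getD m 0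
        = res.getD m 0 := by
      rw [List.getD_eq_getElem?_getD, List.getElem?_append_right (by simp), hlen,
        Nat.sub_self, List.getElem?_drop, Nat.add_zero, ← List.getD_eq_getElem?_getD]
    rw [hget]
    rw [List.set_append]
    simp only [hlen, lt_irrefl, Nat.sub_self]
    have hdrop : res.drop m = res[m] :: res.drop (m + 1) := List.drop_eq_getElem_cons hm
    rw [hdrop, List.set_cons_zero, List.append_assoc]
    simp [List.getD_eq_getElem?_getD, hm]

theorem aAddInto_eq_map (res vec : List Int) :
    aAddInto res vec = (List.range res.length).map (fun j => res.getD j 0 + vec.getD j 0) := by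
  unfold aAddInto
  rw [PySem.List.pyRange_zero_nat, List.foldl_map]
  simp only [PySem.List.pySetD_natCast, PySem.List.pyGetD_natCast]
  rw [foldl_set_range_eq vec res.length res (le_refl _)]
  simp

theorem length_aAddInto (res vec : List Int) : (aAddInto res vec).length = res.length := by
  simp [aAddInto_eq_map]

theorem bRow_eq_aAddInto (d : Nat) (acc v : List Int) (h : acc.length = d) :
    bRow d acc v = aAddInto acc v := by
  unfold bRow
  rw [aAddInto_eq_map, PySem.List.pyRange_zero_nat, List.map_map, h]
  simp [Function.comp, PySem.List.pyGetD_natCast]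

theorem snd_bSubsetSums_ge (d : Nat) :
    ∀ (lst : List (List Int)) (acc : List Int) (k : Int),
    ∀ p ∈ bSubsetSums d lst acc k, k ≤ p.2 ∧ p.2 ≤ k + lst.length := by
  intro lst
  induction lst with
  | nil => intro acc k p hp; simp [bSubsetSums] at hp; simp [hp]
  | cons v rest ih =>
    intro acc k p hp
    simp only [bSubsetSums, List.mem_append] at hp
    rcases hp with hp | hp
    · have := ih (bRow d acc v) (k + 1) p hp
      constructor <;> [omega; (simp only [List.length_cons]; push_cast; omega)]
    · have := ih acc k p hp
      constructor <;> [omega; (simp only [List.length_cons]; push_cast; omega)]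

-- the entries of size k + r among all subset sums are exactly A's size-r combination sums, in order
theorem filter_bSubsetSums (d : Nat) :
    ∀ (lst : List (List Int)) (r : Nat) (acc : List Int) (k : Int), acc.length = d →
    (bSubsetSums d lst acc k).filter (fun p => p.2 == k + (r : Int))
      = (PySem.List.combinations lst r).map (fun c => (c.foldl aAddInto acc, k + (r : Int))) := by
  intro lst
  induction lst with
  | nil =>
    intro r acc k h
    cases r with
    | zero => simp [bSubsetSums, PySem.List.combinations_zero]
    | succ m =>
      rw [PySem.List.combinations_nil_succ]
      simp only [bSubsetSums, List.map_nil, List.filter_cons, List.filter_nil]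
      have : (k == k + ((m : Int) + 1)) = false := by simp; omega
      push_cast
      simp [this]
  | cons v rest ih =>
    intro r acc k h
    simp only [bSubsetSums, List.filter_append]
    cases r with
    | zero =>
      rw [PySem.List.combinations_zero]
      have h1 : (bSubsetSums d rest (bRow d acc v) (k + 1)).filter (fun p => p.2 == k + ((0:Nat) : Int)) = [] := by
        rw [List.filter_eq_nil_iff]
        intro p hp
        have := snd_bSubsetSums_ge d rest (bRow d acc v) (k+1) p hp
        simp; omega
      rw [h1, ih 0 acc k h]
      simp
    | succ m =>
      rw [PySem.List.combinations_cons_succ]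
      have h1 : (bSubsetSums d rest (bRow d acc v) (k + 1)).filter (fun p => p.2 == k + ((m+1 : Nat) : Int))
          = (PySem.List.combinations rest m).map (fun c => (c.foldl aAddInto (aAddInto acc v), k + ((m+1 : Nat) : Int))) := by
        have hb : bRow d acc v = aAddInto acc v := bRow_eq_aAddInto d acc v h
        rw [hb]
        have hlen : (aAddInto acc v).length = d := by rw [length_aAddInto, h]
        have := ih m (aAddInto acc v) (k + 1) hlen
        have hk : k + 1 + (m : Int) = k + ((m+1 : Nat) : Int) := by push_cast; ring
        rw [hk] at this
        exact this
      rw [h1, ih (m+1) acc k h]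
      rw [List.map_append, List.map_map]
      rfl

-- B's bucket loop 'buckets[p[1]].append(p)'
def bucketStep (bks : List (List (List Int × Int))) (p : List Int × Int) : List (List (List Int × Int)) :=
  PySem.List.pySetD bks p.2 (PySem.List.pyGetD bks p.2 [] ++ [p])

theorem length_foldl_bucketStep (pairs : List (List Int × Int)) :
    ∀ bks, (pairs.foldl bucketStep bks).length = bks.length := by
  induction pairs with
  | nil => intro bks; rfl
  | cons p rest ih =>
    intro bks
    rw [List.foldl_cons, ih]
    simp [bucketStep, PySem.List.length_pySetD]

theorem getElem_foldl_bucketStep (pairs : List (List Int × Int)) :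
    ∀ (bks : List (List (List Int × Int))),
    (∀ p ∈ pairs, 0 ≤ p.2 ∧ p.2 < (bks.length : Int)) →
    ∀ (i : Nat) (hi : i < bks.length),
    (pairs.foldl bucketStep bks)[i]?
      = some (bks[i]'hi ++ pairs.filter (fun p => p.2 == (i : Int))) := by
  induction pairs with
  | nil => intro bks _ i hi; simp [List.getElem?_eq_getElem hi]
  | cons p rest ih =>
    intro bks hb i hi
    have hp := hb p (List.mem_cons_self)
    have hlt : p.2.toNat < bks.length := by omega
    have hstep : bucketStep bks p = bks.set p.2.toNat (bks[p.2.toNat] ++ [p]) := by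
      unfold bucketStep
      rw [PySem.List.pySetD_of_nonneg _ _ hp.1, PySem.List.pyGetD_eq_getElem _ _ hp.1 hp.2]
    rw [List.foldl_cons, hstep]
    have hb' : ∀ q ∈ rest, 0 ≤ q.2 ∧ q.2 < ((bks.set p.2.toNat (bks[p.2.toNat] ++ [p])).length : Int) := by
      intro q hq; simpa using hb q (List.mem_cons_of_mem p hq)
    rw [ih _ hb' i (by simpa using hi)]
    rw [List.getElem_set]
    rw [List.filter_cons]
    by_cases hcase : p.2.toNat = i
    · have : (p.2 == (i : Int)) = true := by simp; omega
      simp only [this, if_pos hcase, List.append_assoc, List.singleton_append, if_true]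
      simp [hcase]
    · have : (p.2 == (i : Int)) = false := by simp; omega
      simp only [this, if_neg hcase, Bool.false_eq_true, if_false]

-- B's final 'out.extend(bucket)' loop
theorem foldl_append_flatten {α : Type} (bs : List (List α)) :
    ∀ (acc : List α), bs.foldl (fun out b => out ++ b) acc = acc ++ bs.flatten := by
  induction bs with
  | nil => intro acc; simp
  | cons b rest ih => intro acc; rw [List.foldl_cons, ih]; simp

-- A's nested append loops as one flatMap
theorem button_combos_eq_flatMap (buttons : List (List Int)) :
    button_combos buttons
      = (List.range (buttons.length + 1)).flatMap (fun r =>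
          (PySem.List.combinations buttons r).map (fun c =>
            (c.foldl aAddInto (List.replicate (PySem.List.pyGetD buttons 0 []).length 0), (r : Int)))) := by
  unfold button_combos
  have hcast : ((buttons.length : Int) + 1) = ((buttons.length + 1 : Nat) : Int) := by push_cast; ring
  rw [hcast, PySem.List.pyRange_zero_nat, List.foldl_map]
  have hinner : ∀ (cs : List (List Int × Int)) (r : Nat),
      (PySem.List.combinations buttons ((r : Int)).toNat).foldl (fun combos vecList =>
        combos ++ [(vecList.foldl aAddInto
          (List.replicate (PySem.List.pyGetD buttons 0 []).length 0), (r : Int))]) cs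
      = cs ++ (PySem.List.combinations buttons r).map (fun c =>
          (c.foldl aAddInto (List.replicate (PySem.List.pyGetD buttons 0 []).length 0), (r : Int))) := by
    intro cs r
    rw [Int.toNat_natCast]
    exact PySem.List.foldl_append_singleton_eq_map _ _ _
  simp only [hinner]
  rw [PySem.List.foldl_append_eq_flatMap]
  simp

theorem button_combos_eq_alt (buttons : List (List Int)) :
    button_combos buttons = button_combos_alt buttons := by
  rw [button_combos_eq_flatMap]
  show _ = (((bSubsetSums (PySem.List.pyGetD buttons 0 []).length buttons
      (List.replicate (PySem.List.pyGetD buttons 0 []).length 0) 0).foldl bucketStep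
      (List.replicate (buttons.length + 1) [])).foldl (fun out bucket => out ++ bucket) [])
  set d := (PySem.List.pyGetD buttons 0 []).length with hd
  set pairs := bSubsetSums d buttons (List.replicate d 0) 0 with hpairs
  set n := buttons.length with hn
  have hbounds : ∀ p ∈ pairs, 0 ≤ p.2 ∧ p.2 < ((List.replicate (n+1) ([] : List (List Int × Int))).length : Int) := by
    intro p hp
    have := snd_bSubsetSums_ge d buttons (List.replicate d 0) 0 p hp
    simp only [List.length_replicate]
    push_cast
    omega
  have hbuckets : pairs.foldl bucketStep (List.replicate (n+1) [])
      = (List.range (n+1)).map (fun (i : Nat) => pairs.filter (fun p => p.2 == (i : Int))) := by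
    apply List.ext_getElem?
    intro i
    by_cases hi : i < n + 1
    · rw [getElem_foldl_bucketStep pairs _ hbounds i (by simpa using hi)]
      rw [List.getElem?_map, List.getElem?_range hi]
      simp
    · rw [List.getElem?_eq_none, List.getElem?_eq_none]
      · simp; omega
      · rw [length_foldl_bucketStep]; simp; omega
  rw [hbuckets, foldl_append_flatten, List.nil_append, List.flatMap_def]
  congr 1
  apply List.map_congr_left
  intro r hr
  have := filter_bSubsetSums d buttons r (List.replicate d 0) 0 (by simp)
  simpa using this.symm

-- ===== VERDICT (by name: the statement is the Claim_ definition above) =====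
theorem button_combos_spec : Claim_equal_button_combos := by
  intro buttons _ _
  exact button_combos_eq_alt buttons
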